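-- pv_equiv track=rewrite | github.com/killercece/hevy-web | app/utils/seed_exercises.py | _guess_exercise_type
-- ===== SOURCE A (Python) =====
-- _EQUIP_KEYWORDS: list[tuple[str, str]] = [
--     ("smith", "smith_machine"),
--     ("trap-bar", "trap_bar"),
--     ("trap bar", "trap_bar"),
--     ("barbell", "barbell"),
--     ("dumbbell", "dumbbell"),
--     ("kettlebell", "kettlebell"),
--     ("cable", "cable"),
--     ("lever", "machine"),
--     ("machine", "machine"),
--     ("band", "band"),
--     ("resistance band", "band"),
--     ("weighted plate", "plate"),
--     ("plate", "plate"),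
--     ("landmine", "barbell"),
--     ("bodyweight", "bodyweight"),
-- ]
--
-- def _guess_equipment(name: str) -> str:
--     """Meilleure supposition d'équipement à partir du nom d'exercice."""
--     low = name.lower()
--     for kw, eq in _EQUIP_KEYWORDS:
--         if kw in low:
--             return eq
--     return "bodyweight"
--
-- def _guess_exercise_type(name: str, muscle: str) -> str:
--     """Supposition grossière du type d'exercice (weight/reps/duration/distance)."""
--     low = name.lower()
--     if any(k in low for k in ("walk", "run", "cycling", "rowing-machine", "rowing")):
--         return "distance"
--     if any(k in low for k in ("plank", "hang", "hold", "l-sit")):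
--         return "duration"
--     # Bodyweight non-weighted → reps
--     equip = _guess_equipment(name)
--     if equip == "bodyweight":
--         return "reps"
--     return "weight"
-- ===== SOURCE B (Python) =====
-- _KEYWORD_CATEGORY = {
--     "walk": "distance", "run": "distance", "cycling": "distance",
--     "rowing-machine": "distance", "rowing": "distance",
--     "plank": "duration", "hang": "duration", "hold": "duration", "l-sit": "duration",
--     "smith": "weight", "trap-bar": "weight", "trap bar": "weight", "barbell": "weight",
--     "dumbbell": "weight", "kettlebell": "weight", "cable": "weight", "lever": "weight",
--     "machine": "weight", "band": "weight", "resistance band": "weight",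
--     "weighted plate": "weight", "plate": "weight", "landmine": "weight",
-- }
--
--
-- def _guess_exercise_type(name: str, muscle: str) -> str:
--     """Positional scan: collect the set of matched categories in one sweep over the
--     name's positions, then resolve by fixed priority (distance > duration > weight > reps)."""
--     low = name.lower()
--     found = set()
--     for i in range(len(low)):
--         tail = low[i:]
--         for kw, cat in _KEYWORD_CATEGORY.items():
--             if tail.startswith(kw):
--                 found.add(cat)
--     for cat in ("distance", "duration", "weight"):
--         if cat in found:
--             return cat
--     return "reps"
-- ===== Notes on version B (the rewrite author's own statement) =====
-- stated objective: alternative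
-- what changed: Replaced A's per-keyword substring searches with early-return (two any() chains plus the _guess_equipment first-match keyword loop) by a single positional sweep over the lowered name that accumulates the set of matched categories via startswith at each position, followed by a fixed-priority resolution (distance > duration > weight, default reps); correct because a keyword is a substring iff it starts at some position, and equip=='bodyweight' exactly when no non-bodyweight equipment keyword occurs.
import Mathlib
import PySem

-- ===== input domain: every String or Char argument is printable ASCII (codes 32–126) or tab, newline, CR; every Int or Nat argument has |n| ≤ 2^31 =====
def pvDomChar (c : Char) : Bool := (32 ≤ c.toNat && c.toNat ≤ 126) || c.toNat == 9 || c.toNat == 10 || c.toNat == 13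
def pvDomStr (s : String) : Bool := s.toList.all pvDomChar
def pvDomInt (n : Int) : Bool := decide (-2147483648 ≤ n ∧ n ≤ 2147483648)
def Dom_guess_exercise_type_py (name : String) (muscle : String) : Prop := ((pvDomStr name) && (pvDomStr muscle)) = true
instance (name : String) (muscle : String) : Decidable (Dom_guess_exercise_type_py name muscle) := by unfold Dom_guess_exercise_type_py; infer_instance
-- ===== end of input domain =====

-- B replaces A's per-keyword substring searches with early return by a single positional
-- sweep over the name that accumulates the SET of matched categories, resolved afterwards
-- by fixed priority; same return value, alternative algorithm.


-- ===== PORT A =====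
def pvEquipKeywords : List (String × String) :=
  [("smith", "smith_machine"), ("trap-bar", "trap_bar"), ("trap bar", "trap_bar"),
   ("barbell", "barbell"), ("dumbbell", "dumbbell"), ("kettlebell", "kettlebell"),
   ("cable", "cable"), ("lever", "machine"), ("machine", "machine"),
   ("band", "band"), ("resistance band", "band"), ("weighted plate", "plate"),
   ("plate", "plate"), ("landmine", "barbell"), ("bodyweight", "bodyweight")]

-- the 'for kw, eq in _EQUIP_KEYWORDS' loop of _guess_equipment (first match returns)
def pvEquipGo (low : String) : List (String × String) → String
  | [] => "bodyweight"
  | (kw, eq) :: rest => if PySem.Str.isIn kw low then eq else pvEquipGo low rest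

def pvGuessEquipment (name : String) : String :=
  pvEquipGo (PySem.Str.lower name) pvEquipKeywords

def guess_exercise_type_py (name : String) (muscle : String) : String :=
  let low := PySem.Str.lower name
  if ["walk", "run", "cycling", "rowing-machine", "rowing"].any (fun k => PySem.Str.isIn k low) then
    "distance"
  else if ["plank", "hang", "hold", "l-sit"].any (fun k => PySem.Str.isIn k low) then
    "duration"
  else
    let equip := pvGuessEquipment name
    if equip == "bodyweight" then "reps" else "weight"

-- ===== PORT B =====
-- the _KEYWORD_CATEGORY dict of Source B (items in insertion order)
def pvKwCat : List (String × String) :=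
  [("walk", "distance"), ("run", "distance"), ("cycling", "distance"),
   ("rowing-machine", "distance"), ("rowing", "distance"),
   ("plank", "duration"), ("hang", "duration"), ("hold", "duration"), ("l-sit", "duration"),
   ("smith", "weight"), ("trap-bar", "weight"), ("trap bar", "weight"), ("barbell", "weight"),
   ("dumbbell", "weight"), ("kettlebell", "weight"), ("cable", "weight"), ("lever", "weight"),
   ("machine", "weight"), ("band", "weight"), ("resistance band", "weight"),
   ("weighted plate", "weight"), ("plate", "weight"), ("landmine", "weight")]

-- inner 'for kw, cat in _KEYWORD_CATEGORY.items()' loop at one position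
-- (tail.startswith(kw) is exact as Chars.startswith on the char lists)
def pvScanPos (found : PySem.Set String) (tail : List Char) : PySem.Set String :=
  pvKwCat.foldl
    (fun acc p => if PySem.Chars.startswith tail p.1.toList then PySem.Set.add acc p.2 else acc)
    found

-- the final 'for cat in ("distance", "duration", "weight")' priority loop
def pvPick (found : PySem.Set String) : List String → String
  | [] => "reps"
  | c :: rest => if PySem.Set.contains found c then c else pvPick found rest

def guess_exercise_type_py_alt (name : String) (muscle : String) : String :=
  let lowL := (PySem.Str.lower name).toList
  let found := (PySem.List.pyRange 0 lowL.length 1).foldl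
      (fun acc i => pvScanPos acc (PySem.List.slice lowL (some i) none)) PySem.Set.empty
  pvPick found ["distance", "duration", "weight"]

-- ===== PRECONDITION & SPEC =====
def Spec_guess_exercise_type_py (name : String) (muscle : String) (out : String) : Prop := out = guess_exercise_type_py_alt name muscle
instance (name : String) (muscle : String) (out : String) : Decidable (Spec_guess_exercise_type_py name muscle out) := by unfold Spec_guess_exercise_type_py; infer_instance

-- ===== CLAIM =====
def Claim_equal_guess_exercise_type_py : Prop := ∀ (name : String) (muscle : String), Dom_guess_exercise_type_py name muscle → Spec_guess_exercise_type_py name muscle (guess_exercise_type_py name muscle)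

-- ===== LEMMAS AND PROOFS =====

-- membership after the inner keyword loop at one position
theorem mem_pvScanPos (found : PySem.Set String) (tail : List Char) (c : String) :
    c ∈ pvScanPos found tail ↔
      c ∈ found ∨ ∃ p ∈ pvKwCat, PySem.Chars.startswith tail p.1.toList = true ∧ c = p.2 := by
  unfold pvScanPos
  generalize pvKwCat = l
  induction l generalizing found with
  | nil => simp
  | cons p rest ih =>
      simp only [List.foldl_cons]
      by_cases h : PySem.Chars.startswith tail p.1.toList = true
      · simp only [h, if_true, ih, PySem.Set.mem_add, List.mem_cons]
        constructor
        · rintro (⟨hc | hc⟩ | ⟨q, hq, hs, hc⟩)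
          · exact Or.inl hc
          · exact Or.inr ⟨p, Or.inl rfl, h, hc⟩
          · exact Or.inr ⟨q, Or.inr hq, hs, hc⟩
        · rintro (hc | ⟨q, (rfl | hq), hs, hc⟩)
          · exact Or.inl (Or.inl hc)
          · exact Or.inl (Or.inr hc)
          · exact Or.inr ⟨q, hq, hs, hc⟩
      · simp only [h, ih, List.mem_cons]
        constructor
        · rintro (hc | ⟨q, hq, hs, hc⟩)
          · exact Or.inl hc
          · exact Or.inr ⟨q, Or.inr hq, hs, hc⟩
        · rintro (hc | ⟨q, (rfl | hq), hs, hc⟩)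
          · exact Or.inl hc
          · exact absurd hs h
          · exact Or.inr ⟨q, hq, hs, hc⟩

-- membership after the outer position loop
theorem mem_pvFound (lowL : List Char) (idxs : List Int) (found : PySem.Set String) (c : String) :
    c ∈ idxs.foldl (fun acc i => pvScanPos acc (PySem.List.slice lowL (some i) none)) found ↔
      c ∈ found ∨ ∃ i ∈ idxs, ∃ p ∈ pvKwCat,
        PySem.Chars.startswith (PySem.List.slice lowL (some i) none) p.1.toList = true ∧ c = p.2 := by
  induction idxs generalizing found with
  | nil => simp
  | cons i rest ih =>
      simp only [List.foldl_cons, ih, mem_pvScanPos, List.mem_cons]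
      constructor
      · rintro ((hc | ⟨p, hp, hs, hc⟩) | ⟨j, hj, p, hp, hs, hc⟩)
        · exact Or.inl hc
        · exact Or.inr ⟨i, Or.inl rfl, p, hp, hs, hc⟩
        · exact Or.inr ⟨j, Or.inr hj, p, hp, hs, hc⟩
      · rintro (hc | ⟨j, (rfl | hj), p, hp, hs, hc⟩)
        · exact Or.inl (Or.inl hc)
        · exact Or.inl (Or.inr ⟨p, hp, hs, hc⟩)
        · exact Or.inr ⟨j, hj, p, hp, hs, hc⟩

-- a nonempty keyword starts at some scanned position iff it is a substring
theorem exists_startpos (lowL : List Char) (kw : List Char) (hk : kw ≠ []) :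
    (∃ i ∈ PySem.List.pyRange 0 (lowL.length : Int) 1,
        PySem.Chars.startswith (PySem.List.slice lowL (some i) none) kw = true) ↔
      PySem.Chars.isIn kw lowL = true := by
  rw [← PySem.Chars.exists_prefix_drop_iff_isIn]
  constructor
  · rintro ⟨i, hi, hs⟩
    rw [PySem.List.mem_pyRange_one] at hi
    rw [PySem.List.slice_from lowL hi.1, PySem.Chars.startswith_iff] at hs
    exact ⟨i.toNat, hs⟩
  · rintro ⟨j, hj⟩
    have hjlen : j < lowL.length := by
      by_contra hge
      rw [List.drop_eq_nil_of_le (by omega)] at hj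
      exact hk (List.prefix_nil.mp hj)
    refine ⟨(j : Int), ?_, ?_⟩
    · rw [PySem.List.mem_pyRange_one]
      constructor <;> omega
    · rw [PySem.List.slice_from lowL (by positivity), PySem.Chars.startswith_iff]
      simpa using hj

-- Set.contains as membership (String has lawful BEq)
theorem set_contains_iff (s : PySem.Set String) (x : String) :
    PySem.Set.contains s x = true ↔ x ∈ s := by
  simp [PySem.Set.contains]

-- B's found-set contains a category iff one of its keywords occurs in the lowered name
theorem contains_found (lowL : List Char) (c : String) :
    PySem.Set.contains
        ((PySem.List.pyRange 0 (lowL.length : Int) 1).foldl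
          (fun acc i => pvScanPos acc (PySem.List.slice lowL (some i) none)) PySem.Set.empty) c
      = pvKwCat.any (fun p => decide (p.2 = c) && PySem.Chars.isIn p.1.toList lowL) := by
  rw [Bool.eq_iff_iff, set_contains_iff, mem_pvFound]
  simp only [PySem.Set.empty, List.not_mem_nil, false_or, List.any_eq_true,
    Bool.and_eq_true, decide_eq_true_eq]
  constructor
  · rintro ⟨i, hi, p, hp, hs, hc⟩
    refine ⟨p, hp, hc.symm, ?_⟩
    have hk : p.1.toList ≠ [] := by
      fin_cases hp <;> simp
    exact (exists_startpos lowL p.1.toList hk).mp ⟨i, hi, hs⟩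
  · rintro ⟨p, hp, hc, hin⟩
    have hk : p.1.toList ≠ [] := by
      fin_cases hp <;> simp
    obtain ⟨i, hi, hs⟩ := (exists_startpos lowL p.1.toList hk).mpr hin
    exact ⟨i, hi, p, hp, hs, hc.symm⟩

-- A's first-match equipment scan returns "bodyweight" exactly when none of the 14
-- non-"bodyweight" equipment keywords occurs in the lowered name.
theorem pvEquip_eq_bodyweight (low : String) :
    (pvEquipGo low pvEquipKeywords == "bodyweight")
      = !(["smith", "trap-bar", "trap bar", "barbell", "dumbbell",
           "kettlebell", "cable", "lever", "machine", "band",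
           "resistance band", "weighted plate", "plate", "landmine"].any
            (fun k => PySem.Str.isIn k low)) := by
  simp only [pvEquipKeywords, pvEquipGo, List.any_cons, List.any_nil]
  generalize PySem.Str.isIn "smith" low = b1
  generalize PySem.Str.isIn "trap-bar" low = b2
  generalize PySem.Str.isIn "trap bar" low = b3
  generalize PySem.Str.isIn "barbell" low = b4
  generalize PySem.Str.isIn "dumbbell" low = b5
  generalize PySem.Str.isIn "kettlebell" low = b6
  generalize PySem.Str.isIn "cable" low = b7
  generalize PySem.Str.isIn "lever" low = b8
  generalize PySem.Str.isIn "machine" low = b9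
  generalize PySem.Str.isIn "band" low = b10
  generalize PySem.Str.isIn "resistance band" low = b11
  generalize PySem.Str.isIn "weighted plate" low = b12
  generalize PySem.Str.isIn "plate" low = b13
  generalize PySem.Str.isIn "landmine" low = b14
  generalize PySem.Str.isIn "bodyweight" low = b15
  revert b1 b2 b3 b4 b5 b6 b7 b8 b9 b10 b11 b12 b13 b14 b15
  decide

theorem guess_exercise_type_py_spec : Claim_equal_guess_exercise_type_py := by
  intro name muscle _
  unfold Spec_guess_exercise_type_py
  unfold guess_exercise_type_py guess_exercise_type_py_alt pvGuessEquipment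
  have h1 := contains_found ((PySem.Str.lower name).toList) "distance"
  have h2 := contains_found ((PySem.Str.lower name).toList) "duration"
  have h3 := contains_found ((PySem.Str.lower name).toList) "weight"
  simp only [pvKwCat, List.any_cons, List.any_nil] at h1 h2 h3
  norm_num at h1 h2 h3
  simp only [pvPick, pvEquip_eq_bodyweight,
    List.any_cons, List.any_nil, PySem.Str.isIn_eq]
  split_ifs <;> simp_all
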